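-- pv_equiv track=rewrite | github.com/sunilgknair051/Obst_Markt | Bestellungen_Obst.py | warenkorbSortieren
-- ===== SOURCE A (Python) =====
-- def warenkorbSortieren(warenkorb):
--     warenkorbSortiert = {}
--     for dict in warenkorb:
--         firmenname = dict["Firmenname"]
--         if firmenname not in warenkorbSortiert:
--             warenkorbSortiert[firmenname] = []
--         dict.pop("Firmenname")
--         warenkorbSortiert[firmenname].append(dict)
--     return(warenkorbSortiert)
-- ===== SOURCE B (Python) =====
-- def warenkorbSortieren(warenkorb):
--     # Two-phase grouping: collect distinct firm names in first-occurrence order,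
--     # then build each firm's group by one scan per firm. Return value equals A's;
--     # unlike A, this does not mutate the input dicts (A pops 'Firmenname' in place).
--     keys = []
--     for d in warenkorb:
--         f = d["Firmenname"]
--         if f not in keys:
--             keys.append(f)
--     return {k: [{a: v for a, v in d.items() if a != "Firmenname"}
--                 for d in warenkorb if d["Firmenname"] == k]
--             for k in keys}
-- ===== Notes on version B (the rewrite author's own statement) =====
-- stated objective: alternative
-- what changed: Replaces A's single incremental hash-dict pass (insert-if-missing, pop, append) by a two-phase scheme: first collect the distinct firm names in first-occurrence order, then build each firm's group with a comprehension scan per firm; B does not mutate the input dicts.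
import Mathlib
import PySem

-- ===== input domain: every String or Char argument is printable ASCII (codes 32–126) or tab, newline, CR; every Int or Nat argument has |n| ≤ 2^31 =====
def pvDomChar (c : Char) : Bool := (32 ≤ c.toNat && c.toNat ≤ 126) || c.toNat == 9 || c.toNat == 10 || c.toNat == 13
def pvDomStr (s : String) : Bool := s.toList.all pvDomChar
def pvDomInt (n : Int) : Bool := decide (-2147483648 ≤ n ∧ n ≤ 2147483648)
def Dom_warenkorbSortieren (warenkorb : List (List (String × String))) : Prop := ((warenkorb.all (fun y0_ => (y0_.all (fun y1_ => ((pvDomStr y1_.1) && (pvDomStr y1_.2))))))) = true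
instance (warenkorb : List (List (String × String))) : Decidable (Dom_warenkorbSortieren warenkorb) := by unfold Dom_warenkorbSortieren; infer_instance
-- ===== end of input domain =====

-- B replaces A's single incremental hash-dict pass by "distinct keys first, then one scan per key"
-- (objective: alternative decomposition); equivalence is about the RETURN value only — the Python A
-- pops 'Firmenname' from each input dict in place, B leaves the input unchanged.

-- ===== PORT A =====
def warenkorbSortieren (warenkorb : List (List (String × String))) : List (String × List (List (String × String))) :=
  (warenkorb.foldl (fun acc d =>
      let firmenname := (PySem.Dict.mk d).getD "Firmenname" ""   -- dict["Firmenname"]; Pre_ guarantees the key is present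
      let acc' := if acc.contains firmenname then acc else acc.insert firmenname []   -- if firmenname not in warenkorbSortiert: … = []
      let rest := ((PySem.Dict.mk d).erase "Firmenname").items                        -- dict.pop("Firmenname") leaves the rest of the dict
      acc'.modify firmenname [] (fun l => l ++ [rest])                                -- warenkorbSortiert[firmenname].append(dict)
    ) PySem.Dict.empty).items

-- ===== PORT B =====
def warenkorbSortieren_alt (warenkorb : List (List (String × String))) : List (String × List (List (String × String))) :=
  -- phase 1: distinct firm names in first-occurrence order (keys = []; if f not in keys: keys.append(f))
  let keys := warenkorb.foldl (fun ks d => PySem.Set.add ks ((PySem.Dict.mk d).getD "Firmenname" "")) PySem.Set.empty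
  -- phase 2: one scan per key; the inner dict comprehension drops the 'Firmenname' entry
  keys.map (fun k =>
    (k, (warenkorb.filter (fun d => (PySem.Dict.mk d).getD "Firmenname" "" == k)).map
          (fun d => d.filter (fun p => !(p.1 == "Firmenname")))))

-- ===== PRECONDITION & SPEC =====
-- Pre_ excludes exactly the inputs on which the Python A raises KeyError: a dict without the key 'Firmenname'.
def Pre_warenkorbSortieren (warenkorb : List (List (String × String))) : Prop :=
  ∀ d ∈ warenkorb, "Firmenname" ∈ d.map Prod.fst
instance (warenkorb : List (List (String × String))) : Decidable (Pre_warenkorbSortieren warenkorb) := by unfold Pre_warenkorbSortieren; infer_instance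
def pvWitness_warenkorbSortieren : (List (List (String × String))) :=
  [[("Firmenname", "ACME"), ("Obst", "Apfel")], [("Firmenname", "Biohof"), ("Obst", "Birne")], [("Firmenname", "ACME"), ("Obst", "Kirsche")]]
def Spec_warenkorbSortieren (warenkorb : List (List (String × String))) (out : List (String × List (List (String × String)))) : Prop := out = warenkorbSortieren_alt warenkorb
instance (warenkorb : List (List (String × String))) (out : List (String × List (List (String × String)))) : Decidable (Spec_warenkorbSortieren warenkorb out) := by unfold Spec_warenkorbSortieren; infer_instance

-- ===== CLAIM (what is proved, stated in full; the proofs are below) =====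
def Claim_equal_warenkorbSortieren : Prop := ∀ (warenkorb : List (List (String × String))), Dom_warenkorbSortieren warenkorb → Pre_warenkorbSortieren warenkorb → Spec_warenkorbSortieren warenkorb (warenkorbSortieren warenkorb)

-- ===== LEMMAS AND PROOFS =====

-- the firm name A and B read, and the stripped dict A and B keep (A's erase IS this filter by definition)
def pvFirm (d : List (String × String)) : String := (PySem.Dict.mk d).getD "Firmenname" ""
def pvStrip (d : List (String × String)) : List (String × String) := d.filter (fun p => !(p.1 == "Firmenname"))

-- A's loop body collapses to one `modify`: the insert-if-missing is absorbed
theorem pvStep_eq_modify (acc : PySem.Dict String (List (List (String × String)))) (f : String)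
    (r : List (String × String)) :
    ((if acc.contains f then acc else acc.insert f []).modify f [] (fun l => l ++ [r]))
      = acc.modify f [] (fun l => l ++ [r]) := by
  by_cases h : acc.contains f
  · simp [h]
  · simp only [h, Bool.false_eq_true, if_false]
    simp [PySem.Dict.modify, PySem.Dict.insert_insert_self,
      PySem.Dict.getD_of_not_contains acc ([] : List (List (String × String))) (by simpa using h)]

theorem warenkorbSortieren_eq_items (warenkorb : List (List (String × String))) :
    warenkorbSortieren warenkorb
      = ((warenkorb.map (fun d => (pvFirm d, pvStrip d))).foldl
          (fun acc p => acc.modify p.1 [] (fun l => l ++ [p.2])) PySem.Dict.empty).items := by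
  unfold warenkorbSortieren
  rw [List.foldl_map]
  congr 1
  apply PySem.List.foldl_congr_mem
  intro acc d _
  simpa [pvFirm, pvStrip, PySem.Dict.erase] using
    pvStep_eq_modify acc (pvFirm d) (((PySem.Dict.mk d).erase "Firmenname").items)

theorem warenkorbSortieren_spec' (warenkorb : List (List (String × String))) :
    warenkorbSortieren warenkorb = warenkorbSortieren_alt warenkorb := by
  rw [warenkorbSortieren_eq_items]
  unfold warenkorbSortieren_alt
  -- identify B's key accumulation with PySem.Set.ofList of the firm names
  have hkeys : warenkorb.foldl (fun ks d => PySem.Set.add ks ((PySem.Dict.mk d).getD "Firmenname" "")) PySem.Set.empty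
      = PySem.Set.ofList (warenkorb.map pvFirm) := by
    rw [PySem.Set.ofList, List.foldl_map]
    rfl
  rw [hkeys]
  set l := warenkorb.map (fun d => (pvFirm d, pvStrip d)) with hl
  set D := l.foldl (fun acc p => acc.modify p.1 [] (fun lst => lst ++ [p.2])) PySem.Dict.empty with hD
  -- the keys of A's dict are exactly the distinct firm names, in first-occurrence order
  have hK : D.keys = PySem.Set.ofList (warenkorb.map pvFirm) := by
    rw [hD, PySem.Dict.keys_foldl_modify_key l Prod.fst [] (fun d p lst => lst ++ [p.2]) PySem.Dict.empty]
    simp [hl, List.map_map, PySem.Set.update_nil_left, Function.comp_def]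
  have hnd : D.keys.Nodup := by rw [hK]; exact PySem.Set.nodup_ofList _
  rw [PySem.Dict.items_eq_map_keys D hnd [], hK]
  apply List.map_congr_left
  intro k _
  have hget : D.getD k [] = (l.filter (fun p => p.1 == k)).map (·.2) := by
    rw [hD, PySem.Dict.getD_foldl_modify_append]
    simp
  rw [hget, hl, List.filter_map, List.map_map]
  simp [Function.comp_def, pvFirm, pvStrip]

-- ===== VERDICT (by name: the statement is the Claim_ definition above) =====
theorem warenkorbSortieren_spec : Claim_equal_warenkorbSortieren := by
  intro warenkorb _ _
  exact warenkorbSortieren_spec' warenkorb
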